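-- pv_equiv track=rewrite | github.com/seanchen513/dcp | dcp283 - given int N, return first N regular nums (evenly divide some power of 60).py | first_n_regular_memo
-- ===== SOURCE A (Python) =====
-- def first_n_regular_memo(n):
--     regulars = {1} # set
--     num_reg = 1
--     i = 2 # integers to check if regular or not
--
--     while num_reg < n:
--         if ((i % 2 == 0) and (i // 2 in regulars)) \
--             or ((i % 3 == 0) and (i // 3 in regulars)) \
--             or ((i % 5 == 0) and (i // 5 in regulars)):
--
--             regulars.add(i)
--             num_reg += 1
--
--         i += 1
--
--     return sorted(regulars)
-- ===== SOURCE B (Python) =====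
-- def first_n_regular_memo(n):
--     # Direct factor-stripping test (no memo set, no final sort): a number is
--     # regular iff dividing out all 2s, 3s and 5s leaves 1; candidates are
--     # appended in increasing order, so the result is already sorted.
--     out = [1]
--     count = 1
--     i = 2
--     while count < n:
--         m = i
--         while m % 2 == 0:
--             m //= 2
--         while m % 3 == 0:
--             m //= 3
--         while m % 5 == 0:
--             m //= 5
--         if m == 1:
--             out.append(i)
--             count += 1
--         i += 1
--     return out
-- ===== Notes on version B (the rewrite author's own statement) =====
-- stated objective: alternative
-- what changed: A memoizes the growing set of regular numbers and tests each candidate by set membership of its quotients, then sorts the set at the end; B drops the memo set and the sort entirely and tests each candidate directly by stripping all factors 2, 3, 5 and checking the remainder is 1, appending hits in increasing order.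
import Mathlib
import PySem

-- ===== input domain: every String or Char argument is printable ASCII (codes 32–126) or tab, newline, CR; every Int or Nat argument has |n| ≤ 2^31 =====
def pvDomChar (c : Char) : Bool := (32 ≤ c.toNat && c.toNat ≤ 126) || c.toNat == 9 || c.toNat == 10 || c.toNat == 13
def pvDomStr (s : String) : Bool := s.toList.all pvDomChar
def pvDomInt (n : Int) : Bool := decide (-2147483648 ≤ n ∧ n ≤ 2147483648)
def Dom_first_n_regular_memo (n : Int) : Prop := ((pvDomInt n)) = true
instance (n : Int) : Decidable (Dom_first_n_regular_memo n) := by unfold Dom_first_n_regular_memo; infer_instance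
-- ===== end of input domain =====

-- B replaces A's memoized set + final sort by a direct strip-factors regularity test
-- appending in increasing order (objective: alternative; same asymptotic cost).

-- ===== PORT A =====
-- A's while loop; the fuel argument only makes the unbounded search total (2^n bounds
-- the number of iterations, since the n-th regular number is at most 2^(n-1)).
def pvLoopA (n : Int) : Nat → PySem.Set Int → Int → Int → List Int
  | 0, regulars, _, _ => PySem.List.sorted regulars (fun x => x) false
  | fuel + 1, regulars, numReg, i =>
    if numReg < n then
      if (PySem.Int.mod i 2 = 0 ∧ PySem.Int.floordiv i 2 ∈ regulars)
          ∨ (PySem.Int.mod i 3 = 0 ∧ PySem.Int.floordiv i 3 ∈ regulars)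
          ∨ (PySem.Int.mod i 5 = 0 ∧ PySem.Int.floordiv i 5 ∈ regulars) then
        pvLoopA n fuel (PySem.Set.add regulars i) (numReg + 1) (i + 1)
      else
        pvLoopA n fuel regulars numReg (i + 1)
    else PySem.List.sorted regulars (fun x => x) false

def first_n_regular_memo (n : Int) : List Int :=
  pvLoopA n (2 ^ n.toNat) (PySem.Set.ofList [1]) 1 2

-- ===== PORT B =====
-- 'while m % p == 0: m //= p'; the guards 1 < p and m ≠ 0 only establish termination
-- (never false at any call site reached: p is a literal 2/3/5 and m starts at i ≥ 2).
def pvStrip (p : Int) (m : Int) : Int :=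
  if h : 1 < p ∧ m ≠ 0 ∧ PySem.Int.mod m p = 0 then
    pvStrip p (PySem.Int.floordiv m p)
  else m
termination_by m.natAbs
decreasing_by
  obtain ⟨hp, hm, hmod⟩ := h
  have hq : PySem.Int.floordiv m p * p + PySem.Int.mod m p = m := PySem.Int.floordiv_mul_add_mod m p
  rw [hmod, add_zero] at hq
  have hqa : (PySem.Int.floordiv m p).natAbs * p.natAbs = m.natAbs := by
    rw [← Int.natAbs_mul, hq]
  have hq0 : PySem.Int.floordiv m p ≠ 0 := by
    intro h0; rw [h0, zero_mul] at hq; exact hm hq.symm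
  have h1 : 1 ≤ (PySem.Int.floordiv m p).natAbs := Int.natAbs_pos.mpr hq0
  have h2 : 2 ≤ p.natAbs := by omega
  have h3 := Nat.mul_le_mul_left (PySem.Int.floordiv m p).natAbs h2
  omega

-- B's while loop over candidates, same fuel-for-totality device.
def pvLoopB (n : Int) : Nat → List Int → Int → Int → List Int
  | 0, out, _, _ => out
  | fuel + 1, out, count, i =>
    if count < n then
      let m := pvStrip 5 (pvStrip 3 (pvStrip 2 i))
      if m = 1 then pvLoopB n fuel (out ++ [i]) (count + 1) (i + 1)
      else pvLoopB n fuel out count (i + 1)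
    else out

def first_n_regular_memo_alt (n : Int) : List Int :=
  pvLoopB n (2 ^ n.toNat) [1] 1 2

-- ===== PRECONDITION & SPEC =====
def Spec_first_n_regular_memo (n : Int) (out : List Int) : Prop := out = first_n_regular_memo_alt n
instance (n : Int) (out : List Int) : Decidable (Spec_first_n_regular_memo n out) := by unfold Spec_first_n_regular_memo; infer_instance

-- ===== CLAIM (what is proved, stated in full; the proofs are below) =====
def Claim_equal_first_n_regular_memo : Prop := ∀ (n : Int), Dom_first_n_regular_memo n → Spec_first_n_regular_memo n (first_n_regular_memo n)

-- ===== LEMMAS AND PROOFS =====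

def pvSmooth (m : Int) : Prop := pvStrip 5 (pvStrip 3 (pvStrip 2 m)) = 1

lemma pvStrip_of_not_dvd {p m : Int} (h : ¬ p ∣ m) : pvStrip p m = m := by
  rw [pvStrip]
  have hng : ¬ (1 < p ∧ m ≠ 0 ∧ PySem.Int.mod m p = 0) := by
    rintro ⟨-, -, hmod⟩
    exact h ((PySem.Int.mod_eq_zero_iff_dvd m p).mp hmod)
  simp [hng]

lemma pvStrip_zero (p : Int) : pvStrip p 0 = 0 := by
  rw [pvStrip]; simp

lemma pvFloordiv_mul_cancel {p : Int} (j : Int) (hp : p ≠ 0) :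
    PySem.Int.floordiv (p * j) p = j := by
  have h := PySem.Int.floordiv_mul_add_mod (p * j) p
  have hmod : PySem.Int.mod (p * j) p = 0 :=
    (PySem.Int.mod_eq_zero_iff_dvd _ _).mpr ⟨j, rfl⟩
  rw [hmod, add_zero] at h
  have h2 : PySem.Int.floordiv (p * j) p * p = j * p := by rw [h]; ring
  exact mul_right_cancel₀ hp h2

lemma pvStrip_mul_self {p : Int} (j : Int) (hp : 1 < p) : pvStrip p (p * j) = pvStrip p j := by
  rcases eq_or_ne j 0 with rfl | hj
  · simp [pvStrip_zero]
  · rw [pvStrip]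
    have hg : 1 < p ∧ p * j ≠ 0 ∧ PySem.Int.mod (p * j) p = 0 := by
      refine ⟨hp, mul_ne_zero (by omega) hj, ?_⟩
      exact (PySem.Int.mod_eq_zero_iff_dvd _ _).mpr ⟨j, rfl⟩
    simp only [dif_pos hg]
    rw [pvFloordiv_mul_cancel j (by omega)]

lemma pvStrip_mul_coprime {p q : Int} (hp : Prime p) (hp1 : 1 < p) (hq : ¬ p ∣ q) :
    ∀ j : Int, pvStrip p (q * j) = q * pvStrip p j := by
  have key : ∀ N : Nat, ∀ j : Int, j.natAbs ≤ N → pvStrip p (q * j) = q * pvStrip p j := by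
    intro N
    induction N with
    | zero =>
      intro j hj
      have : j = 0 := by omega
      subst this
      simp [pvStrip_zero]
    | succ N IH =>
      intro j hj
      by_cases hdj : p ∣ j
      · rcases eq_or_ne j 0 with rfl | hj0
        · simp [pvStrip_zero]
        · obtain ⟨j', rfl⟩ := hdj
          have hj' : j' ≠ 0 := by rintro rfl; simp at hj0
          have hlt : j'.natAbs ≤ N := by
            have h1 : 2 ≤ p.natAbs := by omega
            have h2 : (p * j').natAbs = p.natAbs * j'.natAbs := Int.natAbs_mul p j'
            have h3 : 1 ≤ j'.natAbs := Int.natAbs_pos.mpr hj'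
            nlinarith [hj, h2]
          have e1 : q * (p * j') = p * (q * j') := by ring
          rw [e1, pvStrip_mul_self (q * j') hp1, pvStrip_mul_self j' hp1]
          exact IH j' hlt
      · have hnd : ¬ p ∣ q * j := by
          intro hd
          rcases hp.2.2 q j hd with h | h
          · exact hq h
          · exact hdj h
        rw [pvStrip_of_not_dvd hnd, pvStrip_of_not_dvd hdj]
  intro j
  exact key j.natAbs j le_rfl

lemma pvSmooth_two_mul (j : Int) : pvSmooth (2 * j) ↔ pvSmooth j := by
  unfold pvSmooth
  rw [pvStrip_mul_self j (by norm_num)]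

lemma pvSmooth_three_mul (j : Int) : pvSmooth (3 * j) ↔ pvSmooth j := by
  unfold pvSmooth
  rw [show (3 : Int) * j = 3 * j from rfl,
    pvStrip_mul_coprime Int.prime_two (by norm_num) (by decide) j,
    pvStrip_mul_self (pvStrip 2 j) (by norm_num)]

lemma pvSmooth_five_mul (j : Int) : pvSmooth (5 * j) ↔ pvSmooth j := by
  unfold pvSmooth
  rw [pvStrip_mul_coprime Int.prime_two (by norm_num) (by decide) j,
    pvStrip_mul_coprime Int.prime_three (by norm_num) (by decide) (pvStrip 2 j),
    pvStrip_mul_self (pvStrip 3 (pvStrip 2 j)) (by norm_num)]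

-- the recursive characterisation A's membership test implements
lemma pvSmooth_iff (i : Int) (hi : 2 ≤ i) :
    pvSmooth i ↔ ((2 ∣ i ∧ pvSmooth (PySem.Int.floordiv i 2))
      ∨ (3 ∣ i ∧ pvSmooth (PySem.Int.floordiv i 3))
      ∨ (5 ∣ i ∧ pvSmooth (PySem.Int.floordiv i 5))) := by
  constructor
  · intro hs
    by_cases h2 : (2 : Int) ∣ i
    · obtain ⟨j, rfl⟩ := h2
      exact Or.inl ⟨⟨j, rfl⟩, by
        rw [pvFloordiv_mul_cancel j (by norm_num)]
        exact (pvSmooth_two_mul j).mp hs⟩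
    · by_cases h3 : (3 : Int) ∣ i
      · obtain ⟨j, rfl⟩ := h3
        exact Or.inr (Or.inl ⟨⟨j, rfl⟩, by
          rw [pvFloordiv_mul_cancel j (by norm_num)]
          exact (pvSmooth_three_mul j).mp hs⟩)
      · by_cases h5 : (5 : Int) ∣ i
        · obtain ⟨j, rfl⟩ := h5
          exact Or.inr (Or.inr ⟨⟨j, rfl⟩, by
            rw [pvFloordiv_mul_cancel j (by norm_num)]
            exact (pvSmooth_five_mul j).mp hs⟩)
        · exfalso
          unfold pvSmooth at hs
          rw [pvStrip_of_not_dvd h2, pvStrip_of_not_dvd h3, pvStrip_of_not_dvd h5] at hs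
          omega
  · rintro (⟨⟨j, rfl⟩, hs⟩ | ⟨⟨j, rfl⟩, hs⟩ | ⟨⟨j, rfl⟩, hs⟩)
    · rw [pvFloordiv_mul_cancel j (by norm_num)] at hs
      exact (pvSmooth_two_mul j).mpr hs
    · rw [pvFloordiv_mul_cancel j (by norm_num)] at hs
      exact (pvSmooth_three_mul j).mpr hs
    · rw [pvFloordiv_mul_cancel j (by norm_num)] at hs
      exact (pvSmooth_five_mul j).mpr hs

-- one clause of A's test, under the set-characterisation invariant
lemma pvTest_clause {R : List Int} {i : Int} (d : Int) (hd : 2 ≤ d) (hi : 2 ≤ i)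
    (hchar : ∀ x, x ∈ R ↔ (1 ≤ x ∧ x < i ∧ pvSmooth x)) :
    (PySem.Int.mod i d = 0 ∧ PySem.Int.floordiv i d ∈ R)
      ↔ (d ∣ i ∧ pvSmooth (PySem.Int.floordiv i d)) := by
  rw [PySem.Int.mod_eq_zero_iff_dvd]
  constructor
  · rintro ⟨hdvd, hmem⟩
    exact ⟨hdvd, ((hchar _).mp hmem).2.2⟩
  · rintro ⟨hdvd, hs⟩
    refine ⟨hdvd, (hchar _).mpr ⟨?_, ?_, hs⟩⟩ <;>
    · obtain ⟨j, rfl⟩ := hdvd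
      rw [pvFloordiv_mul_cancel j (by omega)]
      nlinarith

lemma pvSorted_eq_self {R : List Int} (hpw : R.Pairwise (· < ·)) :
    PySem.List.sorted R (fun x => x) false = R := by
  apply PySem.List.sorted_eq_self_of_pairwise
  exact hpw.imp fun h => le_of_lt h

lemma pvLoop_eq (n : Int) (fuel : Nat) :
    ∀ (R : List Int) (c i : Int), 2 ≤ i →
    (∀ x, x ∈ R ↔ (1 ≤ x ∧ x < i ∧ pvSmooth x)) →
    R.Pairwise (· < ·) →
    pvLoopA n fuel R c i = pvLoopB n fuel R c i := by
  induction fuel with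
  | zero =>
    intro R c i _ _ hpw
    simp only [pvLoopA, pvLoopB]
    exact pvSorted_eq_self hpw
  | succ fuel IH =>
    intro R c i hi hchar hpw
    simp only [pvLoopA, pvLoopB]
    by_cases hc : c < n
    · simp only [if_pos hc]
      have htest : ((PySem.Int.mod i 2 = 0 ∧ PySem.Int.floordiv i 2 ∈ R)
          ∨ (PySem.Int.mod i 3 = 0 ∧ PySem.Int.floordiv i 3 ∈ R)
          ∨ (PySem.Int.mod i 5 = 0 ∧ PySem.Int.floordiv i 5 ∈ R)) ↔ pvSmooth i := by
        rw [pvTest_clause 2 (by norm_num) hi hchar, pvTest_clause 3 (by norm_num) hi hchar,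
          pvTest_clause 5 (by norm_num) hi hchar]
        exact (pvSmooth_iff i hi).symm
      by_cases hs : pvSmooth i
      · have hsB : pvStrip 5 (pvStrip 3 (pvStrip 2 i)) = 1 := hs
        rw [if_pos (htest.mpr hs), if_pos hsB]
        have hnotmem : i ∉ R := fun hmem => absurd ((hchar i).mp hmem).2.1 (lt_irrefl i)
        rw [PySem.Set.add_of_not_mem hnotmem]
        refine IH (R ++ [i]) (c + 1) (i + 1) (by omega) ?_ ?_
        · intro x
          simp only [List.mem_append, List.mem_singleton]
          constructor
          · rintro (hx | rfl)
            · obtain ⟨h1, h2, h3⟩ := (hchar x).mp hx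
              exact ⟨h1, by omega, h3⟩
            · exact ⟨by omega, by omega, hs⟩
          · rintro ⟨h1, h2, h3⟩
            rcases eq_or_ne x i with rfl | hne
            · exact Or.inr rfl
            · exact Or.inl ((hchar x).mpr ⟨h1, by omega, h3⟩)
        · rw [List.pairwise_append]
          refine ⟨hpw, List.pairwise_singleton _ _, ?_⟩
          intro a ha b hb
          simp only [List.mem_singleton] at hb
          subst hb
          exact ((hchar a).mp ha).2.1
      · have hsB : ¬ pvStrip 5 (pvStrip 3 (pvStrip 2 i)) = 1 := hs
        rw [if_neg (fun hx => hs (htest.mp hx)), if_neg hsB]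
        refine IH R c (i + 1) (by omega) ?_ hpw
        intro x
        rw [hchar x]
        constructor
        · rintro ⟨h1, h2, h3⟩
          exact ⟨h1, by omega, h3⟩
        · rintro ⟨h1, h2, h3⟩
          rcases eq_or_ne x i with rfl | hne
          · exact absurd h3 hs
          · exact ⟨h1, by omega, h3⟩
    · simp only [if_neg hc]
      exact pvSorted_eq_self hpw

lemma pvSmooth_one : pvSmooth 1 := by
  unfold pvSmooth
  have h2 : pvStrip 2 (1 : Int) = 1 := pvStrip_of_not_dvd (by decide)
  have h3 : pvStrip 3 (1 : Int) = 1 := pvStrip_of_not_dvd (by decide)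
  have h5 : pvStrip 5 (1 : Int) = 1 := pvStrip_of_not_dvd (by decide)
  rw [h2, h3, h5]

-- ===== VERDICT (by name: the statement is the Claim_ definition above) =====
theorem first_n_regular_memo_spec : Claim_equal_first_n_regular_memo := by
  intro n _
  unfold Spec_first_n_regular_memo first_n_regular_memo first_n_regular_memo_alt
  have hof : PySem.Set.ofList ([1] : List Int) = [1] := rfl
  rw [hof]
  refine pvLoop_eq n (2 ^ n.toNat) [1] 1 2 (by norm_num) ?_ ?_
  · intro x
    simp only [List.mem_singleton]
    constructor
    · rintro rfl
      exact ⟨by norm_num, by norm_num, pvSmooth_one⟩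
    · rintro ⟨h1, h2, _⟩
      omega
  · exact List.pairwise_singleton _ _
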